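-- pv_equiv track=rewrite | github.com/SaurabhMahajan16/Python | arraySubset.py | optimal_play
-- ===== SOURCE A (Python) =====
-- def optimal_play(segments):
--     """
--     Determine the minimum number of segments Player 1 should play to ensure their
--     score is higher than Player 2's score by the end of the level.
--
--     Args:
--     segments (list): List of integers where 1 represents a segment with a coin and 0 represents a segment without a coin.
--
--     Returns:
--     int: Minimum number of segments Player 1 should play to win.
--     """
--     n = len(segments)
--     player1_score, player2_score = 0, 0
--
--     for i in range(n):
--         # Player 1's score if they stop at this segment
--         player1_score += 1 if segments[i] == 1 else -1
--
--         # Player 2's score if they start after this segment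
--         player2_score = sum(1 if x == 1 else -1 for x in segments[i+1:])
--
--         # If Player 1's score is greater, return the number of segments played
--         if player1_score > player2_score:
--             return i + 1
--
--     # If Player 1 can't win, return 0
--     return 0
-- ===== SOURCE B (Python) =====
-- def optimal_play(segments):
--     # Precompute the total +-1 sum once; the suffix sum after index k is
--     # total - prefix, so no repeated slice-summing is needed.
--     total = sum(1 if x == 1 else -1 for x in segments)
--     prefix = 0
--     for k, x in enumerate(segments):
--         prefix += 1 if x == 1 else -1
--         if prefix > total - prefix:
--             return k + 1
--     return 0
-- ===== Notes on version B (the rewrite author's own statement) =====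
-- stated objective: alternative
-- what changed: Replaced the per-index re-summation of the suffix slice by a single precomputed total with a running prefix sum (suffix = total - prefix): one pass over the list instead of a nested scan.
import Mathlib
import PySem

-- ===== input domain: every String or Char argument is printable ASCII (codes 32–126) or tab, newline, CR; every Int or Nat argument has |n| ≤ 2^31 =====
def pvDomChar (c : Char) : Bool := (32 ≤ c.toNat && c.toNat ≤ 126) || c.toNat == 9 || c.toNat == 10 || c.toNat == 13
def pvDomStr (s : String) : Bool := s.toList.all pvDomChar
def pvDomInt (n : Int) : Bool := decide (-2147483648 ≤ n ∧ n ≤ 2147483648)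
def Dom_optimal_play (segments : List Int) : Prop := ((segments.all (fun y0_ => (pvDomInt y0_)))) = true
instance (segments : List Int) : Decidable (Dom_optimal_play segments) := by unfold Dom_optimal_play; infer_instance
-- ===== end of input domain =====

-- B computes the +-1 total once and maintains a running prefix sum (suffix = total - prefix)
-- in a single pass, instead of re-summing the suffix slice at every index as A does.

-- shared helper: Python's sum(1 if x == 1 else -1 for x in l)
def signSum (l : List Int) : Int := l.foldl (fun a x => a + (if x = 1 then 1 else -1)) 0

-- ===== PORT A =====
def optimal_play_go (segments : List Int) (i : Nat) (p1 : Int) : Int :=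
  if h : i < segments.length then
    let p1' := p1 + (if segments[i] = 1 then 1 else -1)
    let p2 := signSum (PySem.List.slice segments (some ((i : Int) + 1)) none)
    if p1' > p2 then (i : Int) + 1
    else optimal_play_go segments (i + 1) p1'
  else 0
termination_by segments.length - i

def optimal_play (segments : List Int) : Int := optimal_play_go segments 0 0

-- ===== PORT B =====
def optimal_play_alt_go : List Int → Int → Int → Nat → Int
  | [], _, _, _ => 0
  | x :: xs, total, pre, k =>
    let pre' := pre + (if x = 1 then 1 else -1)
    if pre' > total - pre' then (k : Int) + 1
    else optimal_play_alt_go xs total pre' (k + 1)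

def optimal_play_alt (segments : List Int) : Int :=
  optimal_play_alt_go segments (signSum segments) 0 0

-- ===== PRECONDITION & SPEC =====
def Spec_optimal_play (segments : List Int) (out : Int) : Prop := out = optimal_play_alt segments
instance (segments : List Int) (out : Int) : Decidable (Spec_optimal_play segments out) := by unfold Spec_optimal_play; infer_instance

-- ===== CLAIM (what is proved, stated in full; the proofs are below) =====
def Claim_equal_optimal_play : Prop := ∀ (segments : List Int), Dom_optimal_play segments → Spec_optimal_play segments (optimal_play segments)

-- ===== LEMMAS AND PROOFS =====
theorem signSum_foldl_shift (l : List Int) : ∀ a : Int,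
    l.foldl (fun a x => a + (if x = 1 then 1 else -1)) a = a + signSum l := by
  induction l with
  | nil => intro a; simp [signSum]
  | cons x xs ih =>
    intro a
    simp only [List.foldl, signSum] at *
    rw [ih (a + if x = 1 then 1 else -1), ih (0 + if x = 1 then 1 else -1)]
    ring

theorem signSum_cons (x : Int) (xs : List Int) :
    signSum (x :: xs) = (if x = 1 then 1 else -1) + signSum xs := by
  simp only [signSum, List.foldl]
  rw [signSum_foldl_shift xs (0 + if x = 1 then 1 else -1)]
  simp only [signSum]
  ring

theorem go_eq (xs : List Int) : ∀ (n i : Nat) (p1 : Int), xs.length ≤ i + n →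
    optimal_play_go xs i p1 = optimal_play_alt_go (xs.drop i) (p1 + signSum (xs.drop i)) p1 i := by
  intro n
  induction n with
  | zero =>
    intro i p1 hle
    have h : ¬ i < xs.length := by omega
    rw [optimal_play_go, dif_neg h, List.drop_eq_nil_of_le (by omega)]
    rfl
  | succ n ih =>
    intro i p1 hle
    by_cases h : i < xs.length
    · have hd : xs.drop i = xs[i] :: xs.drop (i + 1) := List.drop_eq_getElem_cons h
      have hslice : PySem.List.slice xs (some ((i : Int) + 1)) none = xs.drop (i + 1) := by
        have : ((i : Int) + 1) = ((i + 1 : Nat) : Int) := by push_cast; ring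
        rw [this, PySem.List.slice_from_natCast]
      rw [optimal_play_go, dif_pos h, hd]
      simp only [optimal_play_alt_go, hslice, signSum_cons]
      have htot : p1 + ((if xs[i] = 1 then 1 else -1) + signSum (xs.drop (i + 1)))
          - (p1 + (if xs[i] = 1 then 1 else -1)) = signSum (xs.drop (i + 1)) := by ring
      rw [htot]
      by_cases hc : p1 + (if xs[i] = 1 then 1 else -1) > signSum (xs.drop (i + 1))
      · rw [if_pos hc, if_pos hc]
      · rw [if_neg hc, if_neg hc, ih (i + 1) _ (by omega)]
        ring_nf
    · have hge : xs.length ≤ i := by omega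
      rw [optimal_play_go, dif_neg h, List.drop_eq_nil_of_le hge]
      rfl

-- ===== VERDICT (by name: the statement is the Claim_ definition above) =====
theorem optimal_play_spec : Claim_equal_optimal_play := by
  intro segments _
  show optimal_play segments = optimal_play_alt segments
  rw [optimal_play, optimal_play_alt, go_eq segments segments.length 0 0 (by omega)]
  simp
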